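-- pv_equiv track=rewrite | github.com/denglab/SeqSero | libs/Initial_functions.py | Uniq
-- ===== SOURCE A (Python) =====
-- def Uniq(L): #return the uniq list and the count number
--   Old=L
--   L.sort()
--   L = [L[i] for i in range(len(L)) if L[i] not in L[:i]]
--   count=[]
--   for j in range(len(L)):
--     y=0
--     for x in Old:
--       if L[j]==x:
--         y+=1
--     count.append(y)
--   return (L,count)
-- ===== SOURCE B (Python) =====
-- def Uniq(L):  # one grouping pass over the sorted list instead of repeated membership/count scans
--     L.sort()
--     uniq = []
--     count = []
--     for x in L:
--         if uniq and uniq[-1] == x: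
--             count[-1] += 1
--         else:
--             uniq.append(x)
--             count.append(1)
--     return (uniq, count)
-- ===== Notes on version B (the rewrite author's own statement) =====
-- stated objective: faster
-- what changed: Replaces A's quadratic prefix-membership dedup and per-unique rescans of the whole list with a single run-accumulator pass over the sorted list; like A it sorts the argument in place.
import Mathlib
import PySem

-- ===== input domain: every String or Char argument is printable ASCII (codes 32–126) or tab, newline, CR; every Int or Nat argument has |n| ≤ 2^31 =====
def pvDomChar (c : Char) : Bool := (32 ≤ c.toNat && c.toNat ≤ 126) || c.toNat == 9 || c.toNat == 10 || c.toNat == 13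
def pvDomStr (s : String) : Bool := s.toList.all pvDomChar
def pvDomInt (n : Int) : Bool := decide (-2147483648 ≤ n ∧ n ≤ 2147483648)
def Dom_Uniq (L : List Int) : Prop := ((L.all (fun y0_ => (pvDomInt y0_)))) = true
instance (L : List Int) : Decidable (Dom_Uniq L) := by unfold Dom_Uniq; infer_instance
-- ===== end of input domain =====

-- B replaces A's quadratic prefix-membership dedup and per-unique rescans with one run-grouping
-- pass over the sorted list (faster); both A and B sort the passed list in place — the proof is
-- about the return value.

-- ===== PORT A =====
def Uniq (L : List Int) : List Int × List Int :=
  -- Old = L; L.sort()  (Old aliases L, so Old is the sorted list)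
  let Ls := PySem.List.sorted L (fun x => x) false
  let Old := Ls
  -- L = [L[i] for i in range(len(L)) if L[i] not in L[:i]]
  let L2 := ((PySem.List.pyRange 0 (Ls.length : Int) 1).filter
      (fun i => !decide (PySem.List.pyGetD Ls i 0 ∈ PySem.List.slice Ls none (some i)))).map
      (fun i => PySem.List.pyGetD Ls i 0)
  -- count loop: for j in range(len(L)): y=0; for x in Old: if L[j]==x: y+=1; count.append(y)
  let count := (PySem.List.pyRange 0 (L2.length : Int) 1).foldl
      (fun count j =>
        count ++ [Old.foldl (fun y x => if PySem.List.pyGetD L2 j 0 = x then y + 1 else y) (0 : Int)])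
      []
  (L2, count)

-- ===== PORT B =====
def Uniq_alt (L : List Int) : List Int × List Int :=
  -- L.sort()
  let S := PySem.List.sorted L (fun x => x) false
  -- run accumulator: if uniq and uniq[-1]==x: count[-1]+=1 else: append x, append 1
  S.foldl
    (fun (acc : List Int × List Int) x =>
      let uniq := acc.1
      let count := acc.2
      if PySem.List.pyGet? uniq (-1) = some x then
        (uniq, count.dropLast ++ [PySem.List.pyGetD count (-1) 0 + 1])
      else
        (uniq ++ [x], count ++ [1]))
    ([], [])

-- ===== PRECONDITION & SPEC =====
def Spec_Uniq (L : List Int) (out : List Int × List Int) : Prop := out = Uniq_alt L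
instance (L : List Int) (out : List Int × List Int) : Decidable (Spec_Uniq L out) := by unfold Spec_Uniq; infer_instance

-- ===== CLAIM (what is proved, stated in full; the proofs are below) =====
def Claim_equal_Uniq : Prop := ∀ (L : List Int), Dom_Uniq L → Spec_Uniq L (Uniq L)

-- ===== LEMMAS AND PROOFS =====

-- the common value both ports compute from the sorted list
def uniqRef (xs : List Int) : List Int × List Int :=
  (PySem.List.dedup xs,
   (PySem.List.dedup xs).map (fun u => (0 : Int) + (xs.countP (fun x => decide (u = x)) : Int)))

theorem dedup_append_singleton (xs : List Int) (x : Int) :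
    PySem.List.dedup (xs ++ [x]) =
      if x ∈ xs then PySem.List.dedup xs else PySem.List.dedup xs ++ [x] := by
  simp only [PySem.List.dedup_eq_ofList, PySem.Set.ofList_eq_foldl, List.foldl_append]
  have : PySem.Set.add (List.foldl PySem.Set.add [] xs) x =
      if (List.foldl PySem.Set.add [] xs).contains x then List.foldl PySem.Set.add [] xs
      else List.foldl PySem.Set.add [] xs ++ [x] := rfl
  rw [List.foldl_cons, List.foldl_nil, this]
  have hmem : (List.foldl PySem.Set.add [] xs).contains x = decide (x ∈ xs) := by
    have := PySem.List.mem_dedup xs x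
    simp only [PySem.List.dedup_eq_ofList, PySem.Set.ofList_eq_foldl] at this
    by_cases h : x ∈ xs <;> simp [h, this]
  rw [hmem]
  by_cases h : x ∈ xs <;> simp [h]

-- A's comprehension over indices is the ordered dedup
theorem comprA_eq_dedup (xs : List Int) :
    ((PySem.List.pyRange 0 (xs.length : Int) 1).filter
      (fun i => !decide (PySem.List.pyGetD xs i 0 ∈ PySem.List.slice xs none (some i)))).map
      (fun i => PySem.List.pyGetD xs i 0) = PySem.List.dedup xs := by
  induction xs using List.reverseRecOn with
  | nil => decide
  | append_singleton xs x ih =>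
    rw [dedup_append_singleton]
    have hlen : ((xs ++ [x]).length : Int) = (xs.length : Int) + 1 := by
      simp
    rw [hlen, PySem.List.pyRange_one_succ_right (by positivity), List.filter_append,
        List.map_append]
    have hold : ∀ i ∈ PySem.List.pyRange 0 (xs.length : Int) 1,
        PySem.List.pyGetD (xs ++ [x]) i 0 = PySem.List.pyGetD xs i 0 ∧
        PySem.List.slice (xs ++ [x]) none (some i) = PySem.List.slice xs none (some i) := by
      intro i hi
      rw [PySem.List.mem_pyRange_one] at hi
      obtain ⟨h0, hlt⟩ := hi
      obtain ⟨n, rfl⟩ : ∃ n : Nat, i = (n : Int) := ⟨i.toNat, (Int.toNat_of_nonneg h0).symm⟩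
      have hn : n < xs.length := by exact_mod_cast hlt
      constructor
      · rw [PySem.List.pyGetD_natCast, PySem.List.pyGetD_natCast,
            List.getD_append _ _ _ _ hn]
      · rw [PySem.List.slice_to_natCast, PySem.List.slice_to_natCast,
            List.take_append_of_le_length (le_of_lt hn)]
    have hfeq : (PySem.List.pyRange 0 (xs.length : Int) 1).filter
        (fun i => !decide (PySem.List.pyGetD (xs ++ [x]) i 0 ∈
          PySem.List.slice (xs ++ [x]) none (some i))) =
        (PySem.List.pyRange 0 (xs.length : Int) 1).filter
        (fun i => !decide (PySem.List.pyGetD xs i 0 ∈ PySem.List.slice xs none (some i))) := by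
      apply List.filter_congr
      intro i hi
      rw [(hold i hi).1, (hold i hi).2]
    rw [hfeq]
    have hmeq : ((PySem.List.pyRange 0 (xs.length : Int) 1).filter
        (fun i => !decide (PySem.List.pyGetD xs i 0 ∈ PySem.List.slice xs none (some i)))).map
        (fun i => PySem.List.pyGetD (xs ++ [x]) i 0) =
        ((PySem.List.pyRange 0 (xs.length : Int) 1).filter
        (fun i => !decide (PySem.List.pyGetD xs i 0 ∈ PySem.List.slice xs none (some i)))).map
        (fun i => PySem.List.pyGetD xs i 0) := by
      apply List.map_congr_left
      intro i hi
      exact (hold i (List.mem_of_mem_filter hi)).1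
    rw [hmeq, ih]
    -- the new index xs.length
    have hgetx : PySem.List.pyGetD (xs ++ [x]) (xs.length : Int) 0 = x := by
      rw [PySem.List.pyGetD_natCast]
      simp
    have hslx : PySem.List.slice (xs ++ [x]) none (some (xs.length : Int)) = xs := by
      rw [PySem.List.slice_to_natCast, List.take_append_of_le_length le_rfl, List.take_length]
    by_cases hx : x ∈ xs <;> simp [hgetx, hslx, hx]

-- A's count loop builds the per-unique occurrence counts
theorem countA_eq (old us : List Int) :
    (PySem.List.pyRange 0 (us.length : Int) 1).foldl
      (fun count j =>
        count ++ [old.foldl (fun y x => if PySem.List.pyGetD us j 0 = x then y + 1 else y) (0 : Int)])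
      [] =
    us.map (fun u => (0 : Int) + (old.countP (fun x => decide (u = x)) : Int)) := by
  have hcg := PySem.List.foldl_congr_mem
      (l := PySem.List.pyRange 0 (us.length : Int) 1)
      (init := ([] : List Int))
      (f := fun count j =>
        count ++ [old.foldl (fun y x => if PySem.List.pyGetD us j 0 = x then y + 1 else y) (0 : Int)])
      (g := fun count j =>
        count ++ [(0 : Int) + (old.countP (fun x => decide (PySem.List.pyGetD us j 0 = x)) : Int)])
      (fun acc j _ => by
        show acc ++ [old.foldl (fun y x => if PySem.List.pyGetD us j 0 = x then y + 1 else y) (0 : Int)] =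
          acc ++ [(0 : Int) + (old.countP (fun x => decide (PySem.List.pyGetD us j 0 = x)) : Int)]
        rw [PySem.List.foldl_ite_add_one (fun x => PySem.List.pyGetD us j 0 = x) old 0])
  rw [hcg,
      PySem.List.foldl_pyRange_zero_pyGetD' us (0 : Int)
        (fun count v => count ++ [(0 : Int) + (old.countP (fun x => decide (v = x)) : Int)]) [],
      PySem.List.foldl_append_singleton_eq_map]
  simp

theorem le_getLast_of_sorted :
    ∀ (xs : List Int), xs.Pairwise (· ≤ ·) → ∀ x ∈ xs, ∀ l, xs.getLast? = some l → x ≤ l := by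
  intro xs
  induction xs using List.reverseRecOn with
  | nil => intro _ x hx; simp at hx
  | append_singleton xs y ih =>
    intro hs x hx l hl
    rw [List.getLast?_concat] at hl
    obtain rfl : y = l := by injection hl
    rcases List.mem_append.mp hx with h | h
    · exact (List.pairwise_append.mp hs).2.2 x h _ (List.mem_singleton_self _)
    · simp at h; omega

-- the run-accumulator fold over a sorted list computes uniqRef, whose uniq part ends in the
-- last element of the input
theorem foldB_eq_ref (xs : List Int) (hs : xs.Pairwise (· ≤ ·)) :
    xs.foldl
      (fun (acc : List Int × List Int) x =>
        let uniq := acc.1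
        let count := acc.2
        if PySem.List.pyGet? uniq (-1) = some x then
          (uniq, count.dropLast ++ [PySem.List.pyGetD count (-1) 0 + 1])
        else
          (uniq ++ [x], count ++ [1]))
      ([], []) = uniqRef xs ∧
    (PySem.List.dedup xs).getLast? = xs.getLast? := by
  induction xs using List.reverseRecOn with
  | nil => exact ⟨rfl, rfl⟩
  | append_singleton xs x ih =>
    have hp := List.pairwise_append.mp hs
    have hxs : xs.Pairwise (· ≤ ·) := hp.1
    have hle : ∀ a ∈ xs, a ≤ x := fun a ha => hp.2.2 a ha x (List.mem_singleton_self x)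
    obtain ⟨hfold, hlast⟩ := ih hxs
    rw [List.foldl_append, hfold, List.foldl_cons, List.foldl_nil]
    simp only [uniqRef]
    rw [PySem.List.pyGet?_neg_one, hlast]
    by_cases hx : x ∈ xs
    · -- x repeats the last run: the last element of xs is x
      have hcond : xs.getLast? = some x := by
        have hne : xs ≠ [] := List.ne_nil_of_mem hx
        cases hgl : xs.getLast? with
        | none => exact absurd (List.getLast?_eq_none_iff.mp hgl) hne
        | some m =>
          have h1 : m ≤ x := hle m (List.mem_of_getLast? hgl)
          have h2 : x ≤ m := le_getLast_of_sorted xs hxs x hx m hgl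
          rw [le_antisymm h1 h2]
      rw [if_pos (by rw [hcond])]
      have hded : PySem.List.dedup (xs ++ [x]) = PySem.List.dedup xs := by
        rw [dedup_append_singleton, if_pos hx]
      have hdl : (PySem.List.dedup xs).getLast? = some x := by rw [hlast, hcond]
      obtain ⟨ds, hds⟩ := List.getLast?_eq_some_iff.mp hdl
      have hxds : x ∉ ds := by
        have hnd := PySem.List.nodup_dedup xs
        rw [hds] at hnd
        have := List.disjoint_of_nodup_append hnd
        exact fun hmem => this hmem (List.mem_singleton_self x)
      refine ⟨?_, ?_⟩
      · rw [hded, hds]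
        refine Prod.ext rfl ?_
        simp only [List.map_append, List.map_cons, List.map_nil, List.dropLast_concat,
          PySem.List.pyGetD_neg_one_append_singleton]
        congr 1
        · apply List.map_congr_left
          intro u hu
          have hux : u ≠ x := fun h => hxds (h ▸ hu)
          rw [List.countP_append]
          simp [hux]
        · rw [List.countP_append]
          simp only [List.countP_cons, List.countP_nil, decide_eq_true_eq, List.cons.injEq, and_true]
          simp
      · rw [hded, hdl, List.getLast?_concat]
    · -- new run
      have hcond : ¬ xs.getLast? = some x := fun h => hx (List.mem_of_getLast? h)
      rw [if_neg hcond]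
      have hded : PySem.List.dedup (xs ++ [x]) = PySem.List.dedup xs ++ [x] := by
        rw [dedup_append_singleton, if_neg hx]
      refine ⟨?_, ?_⟩
      · rw [hded]
        refine Prod.ext rfl ?_
        simp only [List.map_append, List.map_cons, List.map_nil]
        congr 1
        · apply List.map_congr_left
          intro u hu
          have hux : u ≠ x := fun h =>
            hx (h ▸ (PySem.List.mem_dedup xs u).mp hu)
          rw [List.countP_append]
          simp [hux]
        · have hcp : xs.countP (fun v => decide (x = v)) = 0 := by
            rw [List.countP_eq_zero]
            intro v hv hxv
            exact hx ((of_decide_eq_true hxv) ▸ hv)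
          rw [List.countP_append, hcp]
          simp
      · rw [hded, List.getLast?_concat, List.getLast?_concat]

-- ===== VERDICT (by name: the statement is the Claim_ definition above) =====
theorem Uniq_spec : Claim_equal_Uniq := by
  intro L _
  unfold Spec_Uniq
  simp only [Uniq, Uniq_alt]
  have hs : (PySem.List.sorted L (fun x => x) false).Pairwise (· ≤ ·) :=
    PySem.List.sorted_pairwise L (fun x => x)
  rw [comprA_eq_dedup, countA_eq,
      (foldB_eq_ref (PySem.List.sorted L (fun x => x) false) hs).1]
  rfl
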